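-- pv_equiv track=rewrite | github.com/chord-observatory/choco | jobs/eop_utils.py | parse_hostport_list
-- ===== SOURCE A (Python) =====
-- def parse_hostport_list(broadcast_list, default_host, default_port):
--     r"""
--     Parse the broadcast list (list of hosts and ports) into a list of
--     hostport pairs.
--
--     The broadcast list is a list of hosts (strings) and ports (positive
--     integers). If a port appears after a host, the two form a host-port pair.
--     If a host or port appear alone, the default host or default port is used
--     to make a pair.
--
--     Ex.
--     [ host1 port1 host2 host3 port2 port3 ]
--     becomes
--     [ (host1, port1), (host2, default_port), (host3, port2),
--      (default_host, port3) ]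
--
--     Parameters
--     ----------
--     broadcast_list : List of str
--         The list of hosts and ports
--     default_host : str
--         Default host to use
--     default_port : int
--         Default port to use
--
--     Returns
--     -------
--     hostports : List of (str, int)
--         The list of host-port pairs
--
--     Raises
--     ------
--     ValueError if a negative port is received
--     """
--
--     hostports = []
--
--     current_host = None
--
--     for word in broadcast_list:
--         isPort = False
--         try:
--             port = int(word)
--             isPort = True
--         except ValueError:
--             isPort = False
--
--         if isPort:
--             if port < 0:
--                 raise ValueError("Bad port value:", port)
--             host = current_host if current_host is not None else default_host
--             hostports.append((host, port))
--             current_host = None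
--         else:
--             if current_host is None:
--                 current_host = word
--             else:
--                 hostports.append((current_host, default_port))
--                 current_host = word
--
--     if current_host is not None:
--         hostports.append((current_host, default_port))
--
--     if len(hostports) == 0:
--         hostports.append((default_host, default_port))
--
--     return hostports
-- ===== SOURCE B (Python) =====
-- def parse_hostport_list(broadcast_list, default_host, default_port):
--     """Index-based single pass with one-token look-ahead instead of a carried
--     pending-host state."""
--
--     def as_port(word):
--         try:
--             return int(word)
--         except ValueError:
--             return None
--
--     hostports = []
--     i = 0
--     n = len(broadcast_list)
--     while i < n:
--         word = broadcast_list[i]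
--         port = as_port(word)
--         if port is not None:
--             if port < 0:
--                 raise ValueError("Bad port value:", port)
--             hostports.append((default_host, port))
--             i += 1
--         else:
--             nxt = as_port(broadcast_list[i + 1]) if i + 1 < n else None
--             if nxt is not None:
--                 if nxt < 0:
--                     raise ValueError("Bad port value:", nxt)
--                 hostports.append((word, nxt))
--                 i += 2
--             else:
--                 hostports.append((word, default_port))
--                 i += 1
--
--     if not hostports:
--         hostports.append((default_host, default_port))
--
--     return hostports
-- ===== Notes on version B (the rewrite author's own statement) =====
-- stated objective: alternative
-- what changed: Replaces A's carried pending-host state (emitted one token later or flushed after the loop) by an index-based while-loop with one-token look-ahead that pairs a host with the next token immediately, consuming one or two tokens per step.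
-- outside the precondition, e.g. on parse_hostport_list(['-3'], 'h', 9): A raises ValueError, B raises ValueError
import Mathlib
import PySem

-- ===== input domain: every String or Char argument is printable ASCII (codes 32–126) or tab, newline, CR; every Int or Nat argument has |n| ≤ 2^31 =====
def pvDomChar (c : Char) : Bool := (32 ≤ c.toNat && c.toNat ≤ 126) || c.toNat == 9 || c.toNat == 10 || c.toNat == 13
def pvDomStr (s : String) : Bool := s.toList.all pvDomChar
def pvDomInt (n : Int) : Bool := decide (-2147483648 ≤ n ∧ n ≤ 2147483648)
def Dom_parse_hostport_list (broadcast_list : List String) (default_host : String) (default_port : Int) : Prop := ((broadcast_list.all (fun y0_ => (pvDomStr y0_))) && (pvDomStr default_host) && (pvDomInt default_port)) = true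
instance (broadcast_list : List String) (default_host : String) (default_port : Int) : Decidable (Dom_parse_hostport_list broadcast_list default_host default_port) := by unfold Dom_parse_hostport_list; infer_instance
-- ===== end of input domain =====

-- B replaces A's carried pending-host state by an index-based pass with one-token
-- look-ahead (same O(n) cost; objective: alternative decomposition).

-- ===== PORT A =====
-- A's for-loop over words with state (hostports, current_host); appends kept as acc ++ [·].
def pvALoop (default_host : String) (default_port : Int) :
    List String → List (String × Int) → Option String → List (String × Int) × Option String
  | [], acc, cur => (acc, cur)
  | w :: ws, acc, cur =>
    match PySem.Int.ofStr? w with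
    | some p =>
      -- Python raises ValueError here when p < 0; Pre_ excludes those inputs.
      let host := match cur with | some h => h | none => default_host
      pvALoop default_host default_port ws (acc ++ [(host, p)]) none
    | none =>
      match cur with
      | none => pvALoop default_host default_port ws acc (some w)
      | some h => pvALoop default_host default_port ws (acc ++ [(h, default_port)]) (some w)

def parse_hostport_list (broadcast_list : List String) (default_host : String) (default_port : Int) : List (String × Int) :=
  let r := pvALoop default_host default_port broadcast_list [] none
  let hostports :=
    match r.2 with
    | some h => r.1 ++ [(h, default_port)]
    | none => r.1
  if hostports.length = 0 then hostports ++ [(default_host, default_port)] else hostports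

-- ===== PORT B =====
-- B's while-loop with one-token look-ahead: recursion consuming one or two tokens.
def pvBLoop (default_host : String) (default_port : Int) : List String → List (String × Int)
  | [] => []
  | w :: ws =>
    match PySem.Int.ofStr? w with
    | some p => (default_host, p) :: pvBLoop default_host default_port ws
    | none =>
      match ws with
      | [] => [(w, default_port)]
      | w2 :: ws2 =>
        match PySem.Int.ofStr? w2 with
        | some p => (w, p) :: pvBLoop default_host default_port ws2
        | none => (w, default_port) :: pvBLoop default_host default_port (w2 :: ws2)

def parse_hostport_list_alt (broadcast_list : List String) (default_host : String) (default_port : Int) : List (String × Int) :=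
  let hostports := pvBLoop default_host default_port broadcast_list
  if hostports = [] then [(default_host, default_port)] else hostports

-- ===== PRECONDITION & SPEC =====
-- Pre_ excludes exactly the inputs on which Python A raises ValueError: a word that
-- int() parses to a negative port.
def Pre_parse_hostport_list (broadcast_list : List String) (default_host : String) (default_port : Int) : Prop :=
  ∀ w ∈ broadcast_list, ∀ p : Int, PySem.Int.ofStr? w = some p → 0 ≤ p
instance (broadcast_list : List String) (default_host : String) (default_port : Int) : Decidable (Pre_parse_hostport_list broadcast_list default_host default_port) := by unfold Pre_parse_hostport_list; infer_instance
def pvWitness_parse_hostport_list : List String × String × Int := (["host1", "80", "host2"], "localhost", 7)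

def Spec_parse_hostport_list (broadcast_list : List String) (default_host : String) (default_port : Int) (out : List (String × Int)) : Prop := out = parse_hostport_list_alt broadcast_list default_host default_port
instance (broadcast_list : List String) (default_host : String) (default_port : Int) (out : List (String × Int)) : Decidable (Spec_parse_hostport_list broadcast_list default_host default_port out) := by unfold Spec_parse_hostport_list; infer_instance

-- ===== CLAIM (what is proved, stated in full; the proofs are below) =====
def Claim_equal_parse_hostport_list : Prop := ∀ (broadcast_list : List String) (default_host : String) (default_port : Int), Dom_parse_hostport_list broadcast_list default_host default_port → Pre_parse_hostport_list broadcast_list default_host default_port → Spec_parse_hostport_list broadcast_list default_host default_port (parse_hostport_list broadcast_list default_host default_port)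

-- ===== LEMMAS AND PROOFS =====

lemma pvBLoop_cons (dh : String) (dp : Int) (w : String) (ws : List String) :
    pvBLoop dh dp (w :: ws) =
      (match PySem.Int.ofStr? w with
       | some p => (dh, p) :: pvBLoop dh dp ws
       | none =>
         match ws with
         | [] => [(w, dp)]
         | w2 :: ws2 =>
           match PySem.Int.ofStr? w2 with
           | some p => (w, p) :: pvBLoop dh dp ws2
           | none => (w, dp) :: pvBLoop dh dp (w2 :: ws2)) := by
  rw [pvBLoop.eq_def]

-- Ghost version of A's loop (accumulator dropped, final flush of current_host folded in).
def pvGA (default_host : String) (default_port : Int) : Option String → List String → List (String × Int)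
  | none, [] => []
  | some h, [] => [(h, default_port)]
  | cur, w :: ws =>
    match PySem.Int.ofStr? w with
    | some p =>
      (((match cur with | some h => h | none => default_host), p)) :: pvGA default_host default_port none ws
    | none =>
      match cur with
      | none => pvGA default_host default_port (some w) ws
      | some h => (h, default_port) :: pvGA default_host default_port (some w) ws

lemma pvALoop_ghost (dh : String) (dp : Int) (ws : List String) :
    ∀ (acc : List (String × Int)) (cur : Option String),
      (match (pvALoop dh dp ws acc cur).2 with
       | some h => (pvALoop dh dp ws acc cur).1 ++ [(h, dp)]
       | none => (pvALoop dh dp ws acc cur).1)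
      = acc ++ pvGA dh dp cur ws := by
  induction ws with
  | nil =>
    intro acc cur
    cases cur <;> simp [pvALoop, pvGA]
  | cons w ws ih =>
    intro acc cur
    cases hw : PySem.Int.ofStr? w with
    | some p =>
      cases cur <;> simp [pvALoop, pvGA, hw, ih]
    | none =>
      cases cur <;> simp [pvALoop, pvGA, hw, ih]

lemma pvGA_eq_B (dh : String) (dp : Int) (ws : List String) :
    pvGA dh dp none ws = pvBLoop dh dp ws ∧
    ∀ w, PySem.Int.ofStr? w = none → pvGA dh dp (some w) ws = pvBLoop dh dp (w :: ws) := by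
  induction ws with
  | nil =>
    refine ⟨rfl, ?_⟩
    intro w hw
    rw [pvBLoop_cons]
    simp [pvGA, hw]
  | cons w2 ws2 ih =>
    constructor
    · cases hw2 : PySem.Int.ofStr? w2 with
      | some p => rw [pvBLoop_cons]; simp [pvGA, hw2, ih.1]
      | none => simp [pvGA, hw2, ih.2 w2 hw2]
    · intro w hw
      cases hw2 : PySem.Int.ofStr? w2 with
      | some p => rw [pvBLoop_cons]; simp [pvGA, hw, hw2, ih.1]
      | none => rw [pvBLoop_cons]; simp [pvGA, hw, hw2, ih.2 w2 hw2]

-- ===== VERDICT (by name: the statement is the Claim_ definition above) =====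
theorem parse_hostport_list_spec : Claim_equal_parse_hostport_list := by
  intro bl dh dp _ _
  unfold Spec_parse_hostport_list parse_hostport_list parse_hostport_list_alt
  have h := pvALoop_ghost dh dp bl [] none
  have h2 := (pvGA_eq_B dh dp bl).1
  simp only [List.nil_append] at h
  simp only [h, h2, List.length_eq_zero_iff]
  split <;> simp_all
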